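-- pv_equiv track=rewrite | github.com/anthonypeters72/Precept-Sandbox | Backups/precepts_backup_kjv_apoc_quran.py | get_refs_for_topic
-- ===== SOURCE A (Python) =====
-- def get_refs_for_topic(topic_name: str, topics: dict[str, list[str]]) -> tuple[str | None, list[str]]:
--     if not topic_name:
--         return None, []
--
--     want = topic_name.strip().lower()
--     if not want or not topics:
--         return None, []
--
--     # exact match first
--     for tname, refs in topics.items():
--         if isinstance(tname, str) and tname.strip().lower() == want:
--             return tname, sorted({r for r in refs if r})
--
--     # substring match fallback (first matching topic name wins)
--     for tname, refs in topics.items():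
--         if isinstance(tname, str) and want in tname.strip().lower():
--             out = sorted(set([r for r in refs if r]))
--             return tname, out
--
--     return None, []
-- ===== SOURCE B (Python) =====
-- def get_refs_for_topic(topic_name: str, topics: dict[str, list[str]]) -> tuple[str | None, list[str]]:
--     if not topic_name:
--         return None, []
--
--     want = topic_name.strip().lower()
--     if not want or not topics:
--         return None, []
--
--     # single pass: return on the first exact match; remember the first substring match
--     sub = None
--     for tname, refs in topics.items():
--         if not isinstance(tname, str):
--             continue
--         norm = tname.strip().lower()
--         if norm == want:
--             return tname, sorted({r for r in refs if r})
--         if sub is None and want in norm: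
--             sub = (tname, refs)
--
--     if sub is not None:
--         return sub[0], sorted({r for r in sub[1] if r})
--     return None, []
-- ===== Notes on version B (the rewrite author's own statement) =====
-- stated objective: alternative
-- what changed: Replaces A's two full scans over topics (exact pass, then substring pass) by a single pass that returns immediately on an exact match and records the first substring match in an accumulator for use after the loop.
import Mathlib
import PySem

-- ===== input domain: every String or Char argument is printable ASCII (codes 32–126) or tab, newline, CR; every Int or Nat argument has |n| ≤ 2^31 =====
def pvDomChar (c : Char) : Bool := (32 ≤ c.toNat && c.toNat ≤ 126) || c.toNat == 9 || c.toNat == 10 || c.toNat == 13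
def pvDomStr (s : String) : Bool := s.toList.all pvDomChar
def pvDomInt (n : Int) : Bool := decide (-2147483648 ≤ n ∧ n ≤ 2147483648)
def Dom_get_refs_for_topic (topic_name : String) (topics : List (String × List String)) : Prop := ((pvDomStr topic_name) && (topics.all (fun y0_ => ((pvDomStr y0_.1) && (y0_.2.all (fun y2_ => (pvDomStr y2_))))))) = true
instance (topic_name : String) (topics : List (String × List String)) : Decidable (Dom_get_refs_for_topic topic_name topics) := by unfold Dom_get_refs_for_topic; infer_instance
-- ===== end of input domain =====

-- B replaces A's two sequential scans over the topics by one pass that returns on an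
-- exact match and records the first substring match; same results (alternative, not faster).

-- ===== PORT A =====
-- sorted({r for r in refs if r})  (both Pythons contain this identical expression)
def pvSortedRefs (refs : List String) : List String :=
  PySem.List.sorted (PySem.Set.ofList (refs.filter (fun r => r ≠ ""))) (fun x => x) false

-- A's second loop: substring match fallback
def pvSubScan (want : String) : List (String × List String) → Option String × List String
  | [] => (none, [])
  | (tname, refs) :: rest =>
      if PySem.Str.isIn want (PySem.Str.lower (PySem.Str.strip tname)) then
        (some tname, pvSortedRefs refs)
      else pvSubScan want rest

-- A's first loop: exact match; when exhausted, fall through to the substring loop over all topics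
def pvExactScan (want : String) (all : List (String × List String)) :
    List (String × List String) → Option String × List String
  | [] => pvSubScan want all
  | (tname, refs) :: rest =>
      if PySem.Str.lower (PySem.Str.strip tname) = want then
        (some tname, pvSortedRefs refs)
      else pvExactScan want all rest

def get_refs_for_topic (topic_name : String) (topics : List (String × List String)) : Option String × List String :=
  if topic_name = "" then (none, [])
  else
    let want := PySem.Str.lower (PySem.Str.strip topic_name)
    if want = "" ∨ topics = [] then (none, [])
    else pvExactScan want topics topics

-- ===== PORT B =====
-- B's single loop: `sub` is the recorded first substring match (the isinstance check is vacuous on String keys)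
def pvOnePass (want : String) : List (String × List String) → Option (String × List String) → Option String × List String
  | [], sub =>
      match sub with
      | some (tname, refs) => (some tname, pvSortedRefs refs)
      | none => (none, [])
  | (tname, refs) :: rest, sub =>
      let norm := PySem.Str.lower (PySem.Str.strip tname)
      if norm = want then (some tname, pvSortedRefs refs)
      else
        pvOnePass want rest
          (if sub = none ∧ PySem.Str.isIn want norm then some (tname, refs) else sub)

def get_refs_for_topic_alt (topic_name : String) (topics : List (String × List String)) : Option String × List String :=
  if topic_name = "" then (none, [])
  else
    let want := PySem.Str.lower (PySem.Str.strip topic_name)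
    if want = "" ∨ topics = [] then (none, [])
    else pvOnePass want topics none

-- ===== PRECONDITION & SPEC =====
def Spec_get_refs_for_topic (topic_name : String) (topics : List (String × List String)) (out : Option String × List String) : Prop := out = get_refs_for_topic_alt topic_name topics
instance (topic_name : String) (topics : List (String × List String)) (out : Option String × List String) : Decidable (Spec_get_refs_for_topic topic_name topics out) := by unfold Spec_get_refs_for_topic; infer_instance

-- ===== CLAIM (what is proved, stated in full; the proofs are below) =====
def Claim_equal_get_refs_for_topic : Prop := ∀ (topic_name : String) (topics : List (String × List String)), Dom_get_refs_for_topic topic_name topics → Spec_get_refs_for_topic topic_name topics (get_refs_for_topic topic_name topics)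

-- ===== LEMMAS AND PROOFS =====

-- first exact match in a list, as an option (proof-side characterisation)
def pvE (want : String) : List (String × List String) → Option (String × List String)
  | [] => none
  | (t, r) :: rest =>
      if PySem.Str.lower (PySem.Str.strip t) = want then some (t, r) else pvE want rest

-- first substring match in a list, as an option
def pvS (want : String) : List (String × List String) → Option (String × List String)
  | [] => none
  | (t, r) :: rest =>
      if PySem.Str.isIn want (PySem.Str.lower (PySem.Str.strip t)) then some (t, r) else pvS want rest

def pvAns : Option (String × List String) → Option String × List String
  | some (t, r) => (some t, pvSortedRefs r)
  | none => (none, [])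

theorem pvSubScan_eq (want : String) (l : List (String × List String)) :
    pvSubScan want l = pvAns (pvS want l) := by
  induction l with
  | nil => rfl
  | cons p rest ih =>
      obtain ⟨t, r⟩ := p
      simp only [pvSubScan, pvS]
      split_ifs <;> simp [pvAns, ih]

theorem pvExactScan_eq (want : String) (all l : List (String × List String)) :
    pvExactScan want all l =
      match pvE want l with
      | some p => pvAns (some p)
      | none => pvAns (pvS want all) := by
  induction l with
  | nil => simp [pvExactScan, pvE, pvSubScan_eq]
  | cons p rest ih =>
      obtain ⟨t, r⟩ := p
      simp only [pvExactScan, pvE]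
      split_ifs <;> simp [pvAns, ih]

theorem pvOnePass_eq (want : String) (l : List (String × List String))
    (sub : Option (String × List String)) :
    pvOnePass want l sub =
      match pvE want l with
      | some p => pvAns (some p)
      | none =>
          match sub with
          | some p => pvAns (some p)
          | none => pvAns (pvS want l) := by
  induction l generalizing sub with
  | nil => cases sub <;> rfl
  | cons p rest ih =>
      obtain ⟨t, r⟩ := p
      simp only [pvOnePass, pvE, pvS]
      by_cases h1 : PySem.Str.lower (PySem.Str.strip t) = want
      · simp [h1, pvAns]
      · rw [if_neg h1, if_neg h1, ih]
        cases sub with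
        | some q =>
            simp only []
            cases pvE want rest <;> simp [pvAns]
        | none =>
            by_cases h2 : PySem.Str.isIn want (PySem.Str.lower (PySem.Str.strip t)) = true
            · simp only [h2, and_true]
              cases pvE want rest <;> simp [pvAns]
            · simp only [h2]
              cases pvE want rest <;> simp [pvAns]

-- ===== VERDICT (by name: the statement is the Claim_ definition above) =====
theorem get_refs_for_topic_spec : Claim_equal_get_refs_for_topic := by
  intro topic_name topics _
  unfold Spec_get_refs_for_topic
  by_cases h1 : topic_name = ""
  · simp [get_refs_for_topic, get_refs_for_topic_alt, h1]
  · simp only [get_refs_for_topic, get_refs_for_topic_alt, if_neg h1]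
    by_cases h2 : PySem.Str.lower (PySem.Str.strip topic_name) = "" ∨ topics = []
    · simp [h2]
    · simp only [if_neg h2]
      rw [pvExactScan_eq, pvOnePass_eq]
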